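-- pv_equiv track=rewrite | github.com/PostHog/posthog | posthog/betting/betting_utils.py | generate_bucket_definitions
-- ===== SOURCE A (Python) =====
-- def generate_bucket_definitions(values: list[int], num_buckets: int = 5) -> list[dict[str, int]]:
--     """
--     Generate bucket definitions based on the distribution of values.
--     Creates buckets that better represent the actual data distribution.
--
--     Args:
--         values: List of values to base the buckets on
--         num_buckets: Number of buckets to create (default: 5)
--
--     Returns:
--         A list of bucket definitions with min and max values
--     """
--     if not values or len(values) < num_buckets:
--         # Default buckets if no data or not enough data points
--         return [{"min": i * 100, "max": (i + 1) * 100 - 1} for i in range(num_buckets)]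
--
--     # Sort values to analyze distribution
--     sorted_values = sorted(values)
--
--     # Use percentiles to create buckets that better represent the distribution
--     bucket_definitions = []
--
--     # Calculate the number of values per bucket
--     values_per_bucket = len(sorted_values) // num_buckets
--     remainder = len(sorted_values) % num_buckets
--
--     current_idx = 0
--
--     for i in range(num_buckets):
--         # Distribute the remainder across the first few buckets
--         bucket_size = values_per_bucket + (1 if i < remainder else 0)
--
--         if bucket_size == 0:
--             # Handle edge case where we have more buckets than values
--             continue
--
--         start_idx = current_idx
--         end_idx = min(current_idx + bucket_size - 1, len(sorted_values) - 1)
--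
--         min_value = sorted_values[start_idx]
--         max_value = sorted_values[end_idx]
--
--         # Ensure no overlap between buckets
--         if bucket_definitions and min_value <= bucket_definitions[-1]["max"]:
--             min_value = bucket_definitions[-1]["max"] + 1
--
--         # Ensure min <= max
--         if min_value > max_value:
--             max_value = min_value
--
--         bucket_definitions.append({"min": min_value, "max": max_value})
--
--         current_idx = end_idx + 1
--
--     # Handle edge case where we didn't use all values
--     if current_idx < len(sorted_values) and bucket_definitions:
--         bucket_definitions[-1]["max"] = max(bucket_definitions[-1]["max"], sorted_values[-1])
--
--     return bucket_definitions
-- ===== SOURCE B (Python) =====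
-- def generate_bucket_definitions(values: list[int], num_buckets: int = 5) -> list[dict[str, int]]:
--     n = len(values)
--     if not values or n < num_buckets:
--         return [{"min": i * 100, "max": i * 100 + 99} for i in range(num_buckets)]
--
--     # Frequency histogram: never materialise a sorted copy of all n values;
--     # only the distinct keys are sorted, and boundary order statistics are
--     # read off by walking cumulative counts.
--     cnt = {}
--     for v in values:
--         cnt[v] = cnt.get(v, 0) + 1
--     keys = sorted(cnt)
--
--     q, r = divmod(n, num_buckets)
--     out = []
--     j = 0      # pointer into keys
--     cum = 0    # number of values strictly before keys[j] in sorted order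
--     prev = None
--     s = 0      # start rank of the current bucket
--     for i in range(num_buckets):
--         e = s + q + (1 if i < r else 0)   # end rank (exclusive)
--         while cum + cnt[keys[j]] <= s:
--             cum += cnt[keys[j]]
--             j += 1
--         lo = keys[j]                      # value at rank s
--         while cum + cnt[keys[j]] <= e - 1:
--             cum += cnt[keys[j]]
--             j += 1
--         hi = keys[j]                      # value at rank e-1
--         if prev is not None and lo <= prev:
--             lo = prev + 1
--         if lo > hi:
--             hi = lo
--         out.append({"min": lo, "max": hi})
--         prev = hi
--         s = e
--     return out
-- ===== Notes on version B (the rewrite author's own statement) =====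
-- stated objective: alternative
-- what changed: B never builds a sorted copy of all n values: it builds a frequency histogram dict, sorts only the distinct keys, and reads each bucket's boundary order statistics by walking cumulative counts with a pointer, replacing A's full sort plus stateful index walk over the sorted array.
-- outside the precondition, e.g. on generate_bucket_definitions([1, 2], 0): A raises ZeroDivisionError, B raises ZeroDivisionError
import Mathlib
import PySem

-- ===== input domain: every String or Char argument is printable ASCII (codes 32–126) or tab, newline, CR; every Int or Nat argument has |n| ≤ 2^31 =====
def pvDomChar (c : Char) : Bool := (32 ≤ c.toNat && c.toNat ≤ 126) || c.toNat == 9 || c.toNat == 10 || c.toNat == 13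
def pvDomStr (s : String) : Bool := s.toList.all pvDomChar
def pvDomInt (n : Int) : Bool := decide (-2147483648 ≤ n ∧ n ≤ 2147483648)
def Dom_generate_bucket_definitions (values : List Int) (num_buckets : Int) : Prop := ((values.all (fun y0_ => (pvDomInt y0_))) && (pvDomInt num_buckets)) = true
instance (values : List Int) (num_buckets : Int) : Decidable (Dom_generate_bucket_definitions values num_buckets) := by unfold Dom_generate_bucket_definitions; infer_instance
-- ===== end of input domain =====

-- B replaces A's full sort of all n values + stateful index walk by a frequency
-- histogram dict whose DISTINCT keys are sorted, reading boundary order statistics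
-- by walking cumulative counts; objective: alternative (a different algorithm, similar cost).

-- d["max"] read with a default (the key is always present in the dicts both programs build)
def pvGetMaxD (d : List (String × Int)) : Int := (d.lookup "max").getD 0
-- d["max"] = v : overwrite in place (keys of the built dicts are unique)
def pvSetMax (d : List (String × Int)) (v : Int) : List (String × Int) :=
  d.map (fun p => if p.1 = "max" then (p.1, v) else p)

-- ===== PORT A =====
-- the body of A's for-loop, as a named step function over the state (bucket_definitions, current_idx)
def pvStepA (sorted_values : List Int) (n values_per_bucket remainder : Int)
    (st : List (List (String × Int)) × Int) (i : Int) : List (List (String × Int)) × Int :=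
  let bucket_size := values_per_bucket + (if i < remainder then 1 else 0)
  if bucket_size = 0 then st
  else
    let start_idx := st.2
    let end_idx := min (st.2 + bucket_size - 1) (n - 1)
    -- indices are always in range here (proved below); the pyGetD default is never used
    let min_value := PySem.List.pyGetD sorted_values start_idx 0
    let max_value := PySem.List.pyGetD sorted_values end_idx 0
    let min_value' :=
      match st.1.getLast? with
      | none => min_value
      | some d => if min_value ≤ pvGetMaxD d then pvGetMaxD d + 1 else min_value
    let max_value' := if min_value' > max_value then min_value' else max_value
    (st.1 ++ [[("min", min_value'), ("max", max_value')]], end_idx + 1)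

def generate_bucket_definitions (values : List Int) (num_buckets : Int) : List (List (String × Int)) :=
  if values = [] ∨ (values.length : Int) < num_buckets then
    (PySem.List.pyRange 0 num_buckets 1).map
      (fun i => [("min", i * 100), ("max", (i + 1) * 100 - 1)])
  else
    let sorted_values := PySem.List.sorted values (fun x => x) false
    let n : Int := sorted_values.length
    let values_per_bucket := PySem.Int.floordiv n num_buckets
    let remainder := PySem.Int.mod n num_buckets
    let st :=
      (PySem.List.pyRange 0 num_buckets 1).foldl
        (pvStepA sorted_values n values_per_bucket remainder) ([], 0)
    if st.2 < n then
      match st.1.getLast? with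
      | none => st.1
      | some d =>
          st.1.dropLast ++ [pvSetMax d (max (pvGetMaxD d) (PySem.List.pyGetD sorted_values (-1) 0))]
    else st.1

-- ===== PORT B =====
-- one Python 'while cum + cnt[keys[j]] <= tgt: cum += cnt[keys[j]]; j += 1' loop;
-- the pointer j into keys is carried as the suffix keys[j:] (step for step the same walk).
-- Python raises IndexError when the pointer runs off the keys; unreachable on admitted inputs.
def pvAdvance (cnt : PySem.Dict Int Int) (tgt : Int) : List Int → Int → List Int × Int
  | [], cum => ([], cum)
  | k :: rest, cum =>
    if cnt.getD k 0 + cum ≤ tgt then pvAdvance cnt tgt rest (cum + cnt.getD k 0)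
    else (k :: rest, cum)

-- the body of B's for-loop, state (out, prev, s, keys-suffix, cum)
def pvStepB (cnt : PySem.Dict Int Int) (q r : Int)
    (st : List (List (String × Int)) × Option Int × Int × List Int × Int) (i : Int) :
    List (List (String × Int)) × Option Int × Int × List Int × Int :=
  let e := st.2.2.1 + q + (if i < r then 1 else 0)
  let a1 := pvAdvance cnt st.2.2.1 st.2.2.2.1 st.2.2.2.2
  -- keys[j]: the suffix is never empty here (proved below); the pyGetD default is never used
  let lo := PySem.List.pyGetD a1.1 0 0
  let a2 := pvAdvance cnt (e - 1) a1.1 a1.2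
  let hi := PySem.List.pyGetD a2.1 0 0
  let lo' := match st.2.1 with | none => lo | some p => if lo ≤ p then p + 1 else lo
  let hi' := if lo' > hi then lo' else hi
  (st.1 ++ [[("min", lo'), ("max", hi')]], some hi', e, a2.1, a2.2)

def generate_bucket_definitions_alt (values : List Int) (num_buckets : Int) : List (List (String × Int)) :=
  if values = [] ∨ (values.length : Int) < num_buckets then
    (PySem.List.pyRange 0 num_buckets 1).map
      (fun i => [("min", i * 100), ("max", i * 100 + 99)])
  else
    let cnt := values.foldl (fun d v => d.insert v (d.getD v 0 + 1)) PySem.Dict.empty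
    let keys := PySem.List.sorted cnt.keys (fun x => x) false
    let q := PySem.Int.floordiv (values.length : Int) num_buckets
    let r := PySem.Int.mod (values.length : Int) num_buckets
    ((PySem.List.pyRange 0 num_buckets 1).foldl (pvStepB cnt q r)
      ([], none, 0, keys, 0)).1

-- ===== PRECONDITION & SPEC =====
-- Pre_ excludes only num_buckets = 0 with nonempty values, where A (and B alike) raises ZeroDivisionError.
def Pre_generate_bucket_definitions (values : List Int) (num_buckets : Int) : Prop :=
  values = [] ∨ num_buckets ≠ 0
instance (values : List Int) (num_buckets : Int) : Decidable (Pre_generate_bucket_definitions values num_buckets) := by unfold Pre_generate_bucket_definitions; infer_instance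
def pvWitness_generate_bucket_definitions : List Int × Int := ([3, 1, 2, 2, 5], 2)

def Spec_generate_bucket_definitions (values : List Int) (num_buckets : Int) (out : List (List (String × Int))) : Prop := out = generate_bucket_definitions_alt values num_buckets
instance (values : List Int) (num_buckets : Int) (out : List (List (String × Int))) : Decidable (Spec_generate_bucket_definitions values num_buckets out) := by unfold Spec_generate_bucket_definitions; infer_instance

-- ===== CLAIM (what is proved, stated in full; the proofs are below) =====
def Claim_equal_generate_bucket_definitions : Prop := ∀ (values : List Int) (num_buckets : Int), Dom_generate_bucket_definitions values num_buckets → Pre_generate_bucket_definitions values num_buckets → Spec_generate_bucket_definitions values num_buckets (generate_bucket_definitions values num_buckets)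

-- ===== LEMMAS AND PROOFS =====

-- closed-form boundary index of bucket k
def pvOff (q r : Int) (k : Nat) : Int := (k : Int) * q + min (k : Int) r

-- the multiset a keys-suffix still represents: each key repeated its count
def pvFlat (cnt : PySem.Dict Int Int) (ks : List Int) : List Int :=
  ks.flatMap (fun k => List.replicate (cnt.getD k 0).toNat k)

theorem pv_count_flat (c : Int → Nat) (x : Int) :
    ∀ ks : List Int, ks.Nodup →
      (ks.flatMap (fun k => List.replicate (c k) k)).count x = if x ∈ ks then c x else 0 := by
  intro ks
  induction ks with
  | nil => simp
  | cons k t ih =>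
      intro hnd
      obtain ⟨hk, ht⟩ := List.nodup_cons.mp hnd
      simp only [List.flatMap_cons, List.count_append, List.count_replicate, List.mem_cons,
        ih ht]
      by_cases hx : x = k
      · subst hx; simp [hk]
      · simp [hx, Ne.symm hx]

theorem pv_pairwise_flat (c : Int → Nat) :
    ∀ ks : List Int, ks.Pairwise (· < ·) →
      (ks.flatMap (fun k => List.replicate (c k) k)).Pairwise (· ≤ ·) := by
  intro ks
  induction ks with
  | nil => simp
  | cons k t ih =>
      intro hp
      simp only [List.flatMap_cons, List.pairwise_append]
      refine ⟨List.pairwise_replicate.mpr (Or.inr le_rfl), ih hp.of_cons, ?_⟩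
      intro a ha b hb
      have ha' : a = k := List.eq_of_mem_replicate ha
      obtain ⟨m, hm, hbm⟩ := List.mem_flatMap.mp hb
      have hb' : b = m := List.eq_of_mem_replicate hbm
      have := List.rel_of_pairwise_cons hp hm
      omega

-- the flattening of the sorted distinct keys with counter counts IS the sorted list
theorem pv_flat_eq (values : List Int) :
    pvFlat (PySem.Dict.counter values)
        (PySem.List.sorted (PySem.Dict.counter values).keys (fun x => x) false)
      = PySem.List.sorted values (fun x => x) false := by
  set keys := PySem.List.sorted (PySem.Dict.counter values).keys (fun x => x) false with hkeys
  have hks : keys = PySem.List.sorted (PySem.Set.ofList values) (fun x => x) false := by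
    rw [hkeys, PySem.Dict.keys_counter]
  have hlt : keys.Pairwise (· < ·) := by
    rw [hks]; exact PySem.List.sorted_ofList_pairwise_lt values
  have hnd : keys.Nodup := hlt.imp (fun h => Int.ne_of_lt h)
  have hmem : ∀ x : Int, x ∈ keys ↔ x ∈ values := by
    intro x
    rw [hks, PySem.List.mem_sorted, PySem.Set.mem_ofList]
  have hflat : pvFlat (PySem.Dict.counter values) keys
      = keys.flatMap (fun k => List.replicate (values.count k) k) := by
    have hfun : (fun k => List.replicate (((PySem.Dict.counter values).getD k 0).toNat) k)
        = (fun k : Int => List.replicate (values.count k) k) := by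
      funext k
      rw [PySem.Dict.getD_counter]
      simp
    unfold pvFlat
    rw [hfun]
  have hperm : (keys.flatMap (fun k => List.replicate (values.count k) k)).Perm values := by
    rw [List.perm_iff_count]
    intro x
    rw [pv_count_flat (fun k => values.count k) x keys hnd]
    by_cases hx : x ∈ keys
    · simp [hx]
    · have : x ∉ values := fun h => hx ((hmem x).mpr h)
      simp [hx, List.count_eq_zero_of_not_mem this]
  have hpw : (keys.flatMap (fun k => List.replicate (values.count k) k)).Pairwise (· ≤ ·) :=
    pv_pairwise_flat _ keys hlt
  rw [hflat]
  exact (PySem.List.sorted_id_eq_of_perm_of_pairwise values _ hperm hpw).symm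

-- pvFlat of a cons is a head run of copies followed by the rest
theorem pv_flat_cons (cnt : PySem.Dict Int Int) (k : Int) (rest : List Int) :
    pvFlat cnt (k :: rest) = List.replicate (cnt.getD k 0).toNat k ++ pvFlat cnt rest := by
  simp [pvFlat]

-- the while-loop walk: it preserves the suffix invariant and lands so that the
-- head of the remaining keys is the value of rank tgt in sv
theorem pv_advance (cnt : PySem.Dict Int Int) (sv : List Int) :
    ∀ (rest : List Int) (cum tgt : Int),
      (∀ k ∈ rest, 0 < cnt.getD k 0) →
      0 ≤ cum →
      pvFlat cnt rest = sv.drop cum.toNat →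
      cum ≤ tgt → tgt < (sv.length : Int) →
      (∀ k ∈ (pvAdvance cnt tgt rest cum).1, 0 < cnt.getD k 0) ∧
      0 ≤ (pvAdvance cnt tgt rest cum).2 ∧
      pvFlat cnt (pvAdvance cnt tgt rest cum).1 = sv.drop (pvAdvance cnt tgt rest cum).2.toNat ∧
      (pvAdvance cnt tgt rest cum).2 ≤ tgt ∧
      PySem.List.pyGetD (pvAdvance cnt tgt rest cum).1 0 0 = PySem.List.pyGetD sv tgt 0 := by
  intro rest
  induction rest with
  | nil =>
      intro cum tgt hpos h0 hfl hle hlt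
      exfalso
      have h1 : sv.drop cum.toNat = [] := by
        rw [← hfl]; simp [pvFlat]
      have h2 : sv.length ≤ cum.toNat := by
        have := List.drop_eq_nil_iff.mp h1
        omega
      omega
  | cons k rest ih =>
      intro cum tgt hpos h0 hfl hle hlt
      have hk : 0 < cnt.getD k 0 := hpos k (List.mem_cons_self)
      by_cases hc : cnt.getD k 0 + cum ≤ tgt
      · have hfl' : pvFlat cnt rest = sv.drop (cum + cnt.getD k 0).toNat := by
          have hnat : (cum + cnt.getD k 0).toNat = cum.toNat + (cnt.getD k 0).toNat := by omega
          rw [hnat, ← List.drop_drop, ← hfl, pv_flat_cons]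
          rw [List.drop_left' (by simp)]
        simp only [pvAdvance, if_pos hc]
        exact ih (cum + cnt.getD k 0) tgt (fun x hx => hpos x (List.mem_cons_of_mem k hx))
          (by omega) hfl' (by omega) hlt
      · simp only [pvAdvance, if_neg hc]
        refine ⟨hpos, h0, hfl, hle, ?_⟩
        have h0t : (0 : Int) ≤ tgt := le_trans h0 hle
        rw [PySem.List.pyGetD_zero_cons, PySem.List.pyGetD_eq_getElem sv 0 h0t hlt]
        have hj : tgt.toNat - cum.toNat < (cnt.getD k 0).toNat := by omega
        have h1 : (sv.drop cum.toNat)[tgt.toNat - cum.toNat]? = sv[tgt.toNat]? := by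
          rw [List.getElem?_drop]
          congr 1
          omega
        have hsome : sv[tgt.toNat]? = some k := by
          rw [← h1, ← hfl, pv_flat_cons,
            List.getElem?_append_left (by simpa using hj)]
          simp [hj]
        have hx := List.getElem?_eq_getElem (l := sv) (i := tgt.toNat) (by omega)
        rw [hx] at hsome
        exact (Option.some.inj hsome).symm

-- closed-form boundary after one more bucket
theorem pv_off_succ (q r : Int) (m : Nat) :
    pvOff q r (m + 1) = pvOff q r m + (q + (if (m : Int) < r then 1 else 0)) := by
  have hmul : ((m : Int) + 1) * q = (m : Int) * q + q := by ring
  simp only [pvOff]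
  push_cast
  rw [hmul]
  omega

-- joint invariant of A's loop and B's loop
theorem pv_loop (sv : List Int) (cnt : PySem.Dict Int Int) (keys : List Int)
    (b q r : Int) (hb : 0 < b) (hq : 1 ≤ q) (hr0 : 0 ≤ r) (hrb : r < b)
    (hn : q * b + r = (sv.length : Int))
    (hkpos : ∀ k ∈ keys, 0 < cnt.getD k 0)
    (hkfl : pvFlat cnt keys = sv) :
    ∀ m : Nat, (m : Int) ≤ b →
      (let sA := ((List.range m).map (fun k : Nat => (k : Int))).foldl
          (pvStepA sv (sv.length : Int) q r) ([], 0)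
       let sB := ((List.range m).map (fun k : Nat => (k : Int))).foldl
          (pvStepB cnt q r) ([], none, 0, keys, 0)
       sB.1 = sA.1 ∧ sA.2 = pvOff q r m ∧
       sB.2.1 = sA.1.getLast?.map pvGetMaxD ∧
       sB.2.2.1 = pvOff q r m ∧
       (∀ k ∈ sB.2.2.2.1, 0 < cnt.getD k 0) ∧ 0 ≤ sB.2.2.2.2 ∧
       pvFlat cnt sB.2.2.2.1 = sv.drop sB.2.2.2.2.toNat ∧
       sB.2.2.2.2 ≤ pvOff q r m) := by
  intro m
  induction m with
  | zero =>
      intro _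
      refine ⟨rfl, ?_, rfl, ?_, hkpos, le_rfl, by simpa using hkfl, ?_⟩ <;>
        (simp [pvOff]; omega)
  | succ m ih =>
      intro hm
      have hm' : (m : Int) ≤ b := by push_cast at hm ⊢; omega
      have hmb : (m : Int) < b := by push_cast at hm; omega
      obtain ⟨h1, h2, h3, h4, h5, h6, h7, h8⟩ := ih hm'
      simp only [List.range_succ, List.map_append, List.map_cons, List.map_nil,
        List.foldl_append, List.foldl_cons, List.foldl_nil]
      set sA := ((List.range m).map (fun k : Nat => (k : Int))).foldl
          (pvStepA sv (sv.length : Int) q r) ([], 0) with hsA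
      set sB := ((List.range m).map (fun k : Nat => (k : Int))).foldl
          (pvStepB cnt q r) ([], none, 0, keys, 0) with hsB
      -- arithmetic bounds on the boundaries
      have hle1 : ((m : Int) + 1) * q ≤ b * q :=
        mul_le_mul_of_nonneg_right (by omega) (by omega)
      have hcomm : b * q = q * b := mul_comm b q
      have hub : pvOff q r (m + 1) ≤ (sv.length : Int) := by
        simp only [pvOff]; push_cast; omega
      have hlow : pvOff q r m + 1 ≤ pvOff q r (m + 1) := by
        rw [pv_off_succ]; split_ifs <;> omega
      have hsize : ¬ (q + (if (m : Int) < r then 1 else 0) = 0) := by split_ifs <;> omega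
      -- A's step
      have hend : min (sA.2 + (q + (if (m : Int) < r then 1 else 0)) - 1)
          ((sv.length : Int) - 1) = pvOff q r (m + 1) - 1 := by
        rw [h2, ← pv_off_succ]
        omega
      -- B's two advances
      have hs_lt : pvOff q r m < (sv.length : Int) := by omega
      obtain ⟨p1, p2, p3, p4, p5⟩ := pv_advance cnt sv sB.2.2.2.1 sB.2.2.2.2 (pvOff q r m)
        h5 h6 h7 (by omega) hs_lt
      set a1 := pvAdvance cnt (pvOff q r m) sB.2.2.2.1 sB.2.2.2.2 with ha1
      obtain ⟨q1, q2, q3, q4, q5⟩ := pv_advance cnt sv a1.1 a1.2 (pvOff q r (m + 1) - 1)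
        p1 p2 p3 (by omega) (by omega)
      set a2 := pvAdvance cnt (pvOff q r (m + 1) - 1) a1.1 a1.2 with ha2
      simp only [pvStepA, pvStepB, if_neg hsize]
      have he : pvOff q r m + q + (if (m : Int) < r then 1 else 0) = pvOff q r (m + 1) := by
        rw [pv_off_succ]; ring
      rw [hend, h4, h2, ← ha1, he, ← ha2, p5, q5]
      refine ⟨?_, by omega, ?_, rfl, q1, q2, q3, by omega⟩
      · rcases hl : sA.1.getLast? with _ | d <;> simp [h1, h3, hl]
      · rcases hl : sA.1.getLast? with _ | d <;>
          simp [h3, hl, pvGetMaxD, List.lookup]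

theorem generate_bucket_definitions_spec : Claim_equal_generate_bucket_definitions := by
  intro values b _ hpre
  unfold Spec_generate_bucket_definitions
  by_cases hc : values = [] ∨ (values.length : Int) < b
  · simp only [generate_bucket_definitions, generate_bucket_definitions_alt, if_pos hc]
    apply List.map_congr_left
    intro i _
    have : (i + 1) * 100 - 1 = i * 100 + 99 := by ring
    rw [this]
  · simp only [generate_bucket_definitions, generate_bucket_definitions_alt, if_neg hc]
    push_neg at hc
    obtain ⟨hne, hlen⟩ := hc
    have hb0 : b ≠ 0 := by
      rcases hpre with h | h
      · exact absurd h hne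
      · exact h
    by_cases hb : b ≤ 0
    · -- num_buckets < 0 (0 is excluded by Pre_): both loops are empty, both return []
      have hb' : b < 0 := lt_of_le_of_ne hb hb0
      rw [show PySem.List.pyRange 0 b 1 = [] from PySem.List.pyRange_one_eq_nil (by omega)]
      simp
    · push_neg at hb
      set sv := PySem.List.sorted values (fun x => x) false with hsv
      set cnt : PySem.Dict Int Int := values.foldl (fun d v => d.insert v (d.getD v 0 + 1)) PySem.Dict.empty with hcnt
      have hcc : cnt = PySem.Dict.counter values :=
        PySem.Dict.foldl_insert_getD_add_one_eq_counter values
      set keys := PySem.List.sorted cnt.keys (fun x => x) false with hkeys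
      have hkfl : pvFlat cnt keys = sv := by
        rw [hkeys, hcc, hsv]; exact pv_flat_eq values
      have hkpos : ∀ k ∈ keys, 0 < cnt.getD k 0 := by
        intro k hkmem
        rw [hkeys, hcc, PySem.Dict.keys_counter, PySem.List.mem_sorted,
          PySem.Set.mem_ofList] at hkmem
        rw [hcc, PySem.Dict.getD_counter]
        exact_mod_cast List.count_pos_iff.mpr hkmem
      set q := PySem.Int.floordiv (values.length : Int) b with hqdef
      set r := PySem.Int.mod (values.length : Int) b with hrdef
      have hnlen : (sv.length : Int) = (values.length : Int) := by
        rw [hsv]; simp [PySem.List.length_sorted]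
      have hn : q * b + r = (sv.length : Int) := by
        rw [hnlen]; exact PySem.Int.floordiv_mul_add_mod _ _
      have hr0 : 0 ≤ r := PySem.Int.mod_nonneg _ hb
      have hrb : r < b := PySem.Int.mod_lt _ hb
      have hq : 1 ≤ q := by
        by_contra h
        push_neg at h
        have : q * b ≤ 0 := mul_nonpos_of_nonpos_of_nonneg (by omega) (by omega)
        have hlen' : b ≤ (sv.length : Int) := by rw [hnlen]; exact hlen
        omega
      set btn := b.toNat with hbtn
      have hbtn' : (btn : Int) = b := Int.toNat_of_nonneg (by omega)
      have hA : PySem.List.pyRange 0 b 1 = (List.range btn).map (fun k : Nat => (k : Int)) := by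
        rw [← hbtn', PySem.List.pyRange_zero_natCast]
      -- A's floordiv/mod are over sv's length, B's over values'; they are equal
      have hqa : PySem.Int.floordiv (sv.length : Int) b = q := by rw [hnlen]
      have hra : PySem.Int.mod (sv.length : Int) b = r := by rw [hnlen]
      rw [hA, hqa, hra]
      obtain ⟨h1, h2, _, _, _, _, _, _⟩ :=
        pv_loop sv cnt keys b q r hb hq hr0 hrb hn hkpos hkfl btn (by omega)
      have hfin : ¬ (((List.range btn).map (fun k : Nat => (k : Int))).foldl
          (pvStepA sv (sv.length : Int) q r) ([], 0)).2 < (sv.length : Int) := by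
        rw [h2]
        have hcomm : b * q = q * b := mul_comm b q
        simp only [pvOff]
        rw [hbtn']
        omega
      rw [if_neg hfin]
      exact h1.symm
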